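-- pv_equiv track=rewrite | github.com/kchapl/book-lamp | book_lamp/utils/sorting.py | _normalise_title_for_sort
-- ===== SOURCE A (Python) =====
-- def _normalise_title_for_sort(title: str) -> str:
--     """Normalise title for sorting by removing leading articles.
--
--     Removes "The", "A", and "An" from the beginning of titles for sorting
--     purposes, while preserving original capitalisation in display.
--
--     Args:
--         title: The book title to normalise.
--
--     Returns:
--         Title with leading articles removed, lowercased for comparison.
--     """
--     if not title:
--         return ""
--     # Remove leading articles (case-insensitive)
--     title_lower = title.lower().strip()
--     for article in ["the ", "a ", "an "]:
--         if title_lower.startswith(article):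
--             return title_lower[len(article) :]
--     return title_lower
-- ===== SOURCE B (Python) =====
-- def _normalise_title_for_sort(title: str) -> str:
--     """Normalise title for sorting by removing leading articles.
--
--     Tokenises once: splits off the first word and drops it when it is a
--     leading article ("the", "a", "an") followed by a space.
--     """
--     if not title:
--         return ""
--     title_lower = title.lower().strip()
--     head, sep, rest = title_lower.partition(" ")
--     if sep and head in {"the", "a", "an"}:
--         return rest
--     return title_lower
-- ===== Notes on version B (the rewrite author's own statement) =====
-- stated objective: simpler
-- what changed: Replaces A's loop over the three article-prefix strings ("the ", "a ", "an ") by a single partition at the first space plus a membership test of the first word in {"the", "a", "an"}.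
import Mathlib
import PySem

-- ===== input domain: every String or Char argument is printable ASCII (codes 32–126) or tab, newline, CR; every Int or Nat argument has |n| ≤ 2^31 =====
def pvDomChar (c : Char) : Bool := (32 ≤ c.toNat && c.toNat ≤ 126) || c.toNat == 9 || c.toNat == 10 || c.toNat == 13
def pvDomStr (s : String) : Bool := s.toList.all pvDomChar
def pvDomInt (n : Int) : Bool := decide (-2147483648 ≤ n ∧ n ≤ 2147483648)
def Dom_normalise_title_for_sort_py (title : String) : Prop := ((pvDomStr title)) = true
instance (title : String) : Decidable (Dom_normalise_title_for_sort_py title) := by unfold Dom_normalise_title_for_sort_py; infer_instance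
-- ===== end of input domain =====

-- B replaces A's loop over three article-prefix strings by a single first-word
-- tokenisation (partition at the first space) plus a membership test (objective: simpler).


-- ===== PORT A =====
-- A's 'for article in ["the ", "a ", "an "]' loop, as structural recursion over that list
def nts_articleLoop (title_lower : String) : List String → String
  | [] => title_lower
  | article :: rest =>
      if PySem.Str.startswith title_lower article then
        PySem.Str.slice title_lower (some (PySem.Str.len article)) none
      else nts_articleLoop title_lower rest

def normalise_title_for_sort_py (title : String) : String :=
  if title = "" then ""
  else
    let title_lower := PySem.Str.strip (PySem.Str.lower title)
    nts_articleLoop title_lower ["the ", "a ", "an "]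

-- ===== PORT B =====
-- str.partition(" ") is ported by hand (no PySem primitive): CPython splits at the
-- FIRST occurrence of the separator, i.e. at s.find(" "); exact on all inputs.
def normalise_title_for_sort_py_alt (title : String) : String :=
  if title = "" then ""
  else
    let title_lower := PySem.Str.strip (PySem.Str.lower title)
    let i := PySem.Str.find title_lower " "
    if i = -1 then title_lower        -- no separator: sep = "" is falsy, return unchanged
    else
      let head := PySem.Str.slice title_lower none (some i)
      let rest := PySem.Str.slice title_lower (some (i + 1)) none
      if head ∈ (["the", "a", "an"] : List String) then rest else title_lower

-- ===== PRECONDITION & SPEC =====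
def Spec_normalise_title_for_sort_py (title : String) (out : String) : Prop := out = normalise_title_for_sort_py_alt title
instance (title : String) (out : String) : Decidable (Spec_normalise_title_for_sort_py title out) := by unfold Spec_normalise_title_for_sort_py; infer_instance

-- ===== CLAIM (what is proved, stated in full; the proofs are below) =====
def Claim_equal_normalise_title_for_sort_py : Prop := ∀ (title : String), Dom_normalise_title_for_sort_py title → Spec_normalise_title_for_sort_py title (normalise_title_for_sort_py title)

-- ===== LEMMAS AND PROOFS =====

-- find points at k when a space sits at k and none before it
theorem pv_find_space_eq (l : List Char) (k : ℕ)
    (h1 : [' '] <+: l.drop k) (h2 : ∀ i < k, ¬ [' '] <+: l.drop i) :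
    PySem.Chars.find l [' '] = (k : ℤ) := by
  have hin : [' '] <:+: l := by
    obtain ⟨r, hr⟩ := h1
    exact ⟨l.take k, r, by rw [List.append_assoc, hr, List.take_append_drop]⟩
  have hnn : 0 ≤ PySem.Chars.find l [' '] := (PySem.Chars.find_nonneg_iff _ _).2 hin
  obtain ⟨hp, hmin⟩ := PySem.Chars.find_spec hnn
  have htn : (PySem.Chars.find l [' ']).toNat = k := by
    rcases lt_trichotomy (PySem.Chars.find l [' ']).toNat k with h | h | h
    · exact absurd hp (h2 _ h)
    · exact h
    · exact absurd h1 (hmin _ h)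
  omega

-- if there is no space at all, no article-plus-space is a prefix
theorem pv_no_space_no_article (l w : List Char)
    (hfind : PySem.Chars.find l [' '] = -1) :
    PySem.Chars.startswith l (w ++ [' ']) = false := by
  have hninf := (PySem.Chars.find_eq_neg_one_iff l [' ']).1 hfind
  rw [Bool.eq_false_iff]
  intro hsw
  obtain ⟨r, hr⟩ := (PySem.Chars.startswith_iff _ _).1 (by simpa using hsw)
  exact hninf ⟨w, r, by simpa using hr⟩

-- a space-free word w followed by a space is a prefix iff the first space is at
-- position w.length and the text up to there is exactly w
theorem pv_startswith_article (l w : List Char) (hw : ' ' ∉ w) :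
    PySem.Chars.startswith l (w ++ [' ']) = true ↔
      (PySem.Chars.find l [' '] = (w.length : ℤ) ∧ l.take w.length = w) := by
  rw [PySem.Chars.startswith_iff]
  constructor
  · rintro ⟨r, hr⟩
    have hl : l = w ++ (' ' :: r) := by rw [← hr]; simp
    subst hl
    refine ⟨?_, by simp⟩
    apply pv_find_space_eq
    · simp
    · intro i hi hpre
      rw [List.drop_append_of_le_length (le_of_lt hi)] at hpre
      obtain ⟨t, ht⟩ := hpre
      have hdrop : w.drop i = w[i] :: w.drop (i + 1) := List.drop_eq_getElem_cons hi
      rw [hdrop] at ht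
      simp only [List.cons_append] at ht
      have : ' ' = w[i] := (List.cons.inj ht).1
      exact hw (this ▸ List.getElem_mem hi)
  · rintro ⟨hf, ht⟩
    have hnn : 0 ≤ PySem.Chars.find l [' '] := by omega
    obtain ⟨hp, -⟩ := PySem.Chars.find_spec hnn
    rw [hf] at hp
    simp only [Int.toNat_natCast] at hp
    obtain ⟨r, hr⟩ := hp
    exact ⟨r, by rw [← List.take_append_drop w.length l, ht, ← hr]; simp⟩

-- the space found at k lies inside l
theorem pv_find_lt_length (l : List Char) (k : ℕ)
    (hf : PySem.Chars.find l [' '] = (k : ℤ)) : k < l.length := by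
  have hnn : 0 ≤ PySem.Chars.find l [' '] := by omega
  obtain ⟨hp, -⟩ := PySem.Chars.find_spec hnn
  rw [hf] at hp
  simp only [Int.toNat_natCast] at hp
  obtain ⟨r, hr⟩ := hp
  have := congrArg List.length hr
  simp at this
  omega

-- one branch of the final no-match case: head = article is impossible when the
-- corresponding startswith is false
theorem pv_head_ne (s : String) (w : List Char) (hw : ' ' ∉ w) (k : ℕ)
    (hfk : PySem.Chars.find s.toList [' '] = (k : ℤ))
    (hklt : k < s.toList.length)
    (hsw : ¬ PySem.Chars.startswith s.toList (w ++ [' ']) = true)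
    (h : s.toList.take k = w) : False := by
  have hk : k = w.length := by
    have := congrArg List.length h
    rw [List.length_take] at this
    omega
  exact hsw ((pv_startswith_article s.toList w hw).2 ⟨by rw [hfk, hk], by rw [← hk, h]⟩)

theorem normalise_title_for_sort_py_spec_aux (title : String) :
    normalise_title_for_sort_py title = normalise_title_for_sort_py_alt title := by
  unfold normalise_title_for_sort_py normalise_title_for_sort_py_alt
  by_cases h0 : title = ""
  · simp [h0]
  simp only [if_neg h0]
  set s := PySem.Str.strip (PySem.Str.lower title) with hs
  clear_value s
  simp only [nts_articleLoop]
  by_cases hneg : PySem.Str.find s " " = -1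
  · have h1 : PySem.Chars.find s.toList [' '] = -1 := by simpa using hneg
    have e1 : PySem.Chars.startswith s.toList ['t','h','e',' '] = false :=
      pv_no_space_no_article s.toList ['t','h','e'] h1
    have e2 : PySem.Chars.startswith s.toList ['a',' '] = false :=
      pv_no_space_no_article s.toList ['a'] h1
    have e3 : PySem.Chars.startswith s.toList ['a','n',' '] = false :=
      pv_no_space_no_article s.toList ['a','n'] h1
    simp [h1, e1, e2, e3]
  · have hnn : 0 ≤ PySem.Chars.find s.toList [' '] := by
      have hge := PySem.Chars.neg_one_le_find s.toList [' ']
      have h1 : ¬ PySem.Chars.find s.toList [' '] = -1 := by simpa using hneg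
      omega
    set k := (PySem.Chars.find s.toList [' ']).toNat with hk
    have hfk : PySem.Chars.find s.toList [' '] = (k : ℤ) := by omega
    have hklt : k < s.toList.length := pv_find_lt_length _ _ hfk
    have hfindS : PySem.Str.find s " " = (k : ℤ) := by simpa using hfk
    have hheadL : (PySem.Str.slice s none (some (PySem.Str.find s " "))).toList
        = s.toList.take k := by
      rw [hfindS]
      simp [PySem.Str.toList_slice, PySem.List.slice_to_natCast]
    have hrestL : (PySem.Str.slice s (some (PySem.Str.find s " " + 1))).toList
        = s.toList.drop (k + 1) := by
      rw [hfindS]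
      simp only [PySem.Str.toList_slice, PySem.Chars.slice_eq_listSlice]
      rw [show (k : ℤ) + 1 = ((k + 1 : ℕ) : ℤ) by push_cast; ring,
        PySem.List.slice_from_natCast]
    rw [if_neg hneg]
    by_cases hthe : PySem.Chars.startswith s.toList (['t','h','e'] ++ [' ']) = true
    · obtain ⟨hf, ht⟩ := (pv_startswith_article _ _ (by decide)).1 hthe
      have hk3 : k = 3 := by simp at hf; omega
      have e1 : PySem.Str.startswith s "the " = true := by simpa using hthe
      have hhead : PySem.Str.slice s none (some (PySem.Str.find s " ")) = "the" := by
        apply String.toList_inj.mp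
        rw [hheadL, hk3]
        simpa [hk3] using ht
      rw [if_pos e1, if_pos (by rw [hhead]; decide)]
      apply String.toList_inj.mp
      rw [hrestL, hk3, show PySem.Str.len "the " = ((4 : ℕ) : ℤ) by decide]
      simp only [PySem.Str.toList_slice, PySem.Chars.slice_eq_listSlice]
      rw [PySem.List.slice_from_natCast]
    · have e1 : ¬ PySem.Str.startswith s "the " = true := by simpa using hthe
      rw [if_neg e1]
      by_cases ha : PySem.Chars.startswith s.toList (['a'] ++ [' ']) = true
      · obtain ⟨hf, ht⟩ := (pv_startswith_article _ _ (by decide)).1 ha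
        have hk1 : k = 1 := by simp at hf; omega
        have e2 : PySem.Str.startswith s "a " = true := by simpa using ha
        have hhead : PySem.Str.slice s none (some (PySem.Str.find s " ")) = "a" := by
          apply String.toList_inj.mp
          rw [hheadL, hk1]
          simpa [hk1] using ht
        rw [if_pos e2, if_pos (by rw [hhead]; decide)]
        apply String.toList_inj.mp
        rw [hrestL, hk1, show PySem.Str.len "a " = ((2 : ℕ) : ℤ) by decide]
        simp only [PySem.Str.toList_slice, PySem.Chars.slice_eq_listSlice]
        rw [PySem.List.slice_from_natCast]
      · have e2 : ¬ PySem.Str.startswith s "a " = true := by simpa using ha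
        rw [if_neg e2]
        by_cases han : PySem.Chars.startswith s.toList (['a','n'] ++ [' ']) = true
        · obtain ⟨hf, ht⟩ := (pv_startswith_article _ _ (by decide)).1 han
          have hk2 : k = 2 := by simp at hf; omega
          have e3 : PySem.Str.startswith s "an " = true := by simpa using han
          have hhead : PySem.Str.slice s none (some (PySem.Str.find s " ")) = "an" := by
            apply String.toList_inj.mp
            rw [hheadL, hk2]
            simpa [hk2] using ht
          rw [if_pos e3, if_pos (by rw [hhead]; decide)]
          apply String.toList_inj.mp
          rw [hrestL, hk2, show PySem.Str.len "an " = ((3 : ℕ) : ℤ) by decide]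
          simp only [PySem.Str.toList_slice, PySem.Chars.slice_eq_listSlice]
          rw [PySem.List.slice_from_natCast]
        · have e3 : ¬ PySem.Str.startswith s "an " = true := by simpa using han
          rw [if_neg e3]
          have hno : PySem.Str.slice s none (some (PySem.Str.find s " "))
              ∉ (["the", "a", "an"] : List String) := by
            intro hmem
            simp only [List.mem_cons, List.not_mem_nil, or_false] at hmem
            rcases hmem with h | h | h
            · exact pv_head_ne s ['t','h','e'] (by decide) k hfk hklt hthe
                (by rw [← hheadL, h]; decide)
            · exact pv_head_ne s ['a'] (by decide) k hfk hklt ha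
                (by rw [← hheadL, h]; decide)
            · exact pv_head_ne s ['a','n'] (by decide) k hfk hklt han
                (by rw [← hheadL, h]; decide)
          rw [if_neg hno]

-- ===== VERDICT (by name: the statement is the Claim_ definition above) =====
theorem normalise_title_for_sort_py_spec : Claim_equal_normalise_title_for_sort_py := by
  intro title _
  exact normalise_title_for_sort_py_spec_aux title
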